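-- pv_equiv track=rewrite | github.com/VitamOrdinatio/variant_annotation_pipeline | pipeline/stage_08_filter_and_partition.py | _assign_variant_context
-- ===== SOURCE A (Python) =====
-- from typing import Any
--
-- MISSING_TOKENS = {"", "NA", "N/A", ".", "NULL", "None", "none", "nan", "NaN"}
--
-- CONTEXT_PRIORITY = [
--     "splice_region",
--     "coding",
--     "regulatory",
--     "intronic",
--     "intergenic",
--     "noncoding_transcript",
--     "unknown",
-- ]
--
-- CODING_CONSEQUENCE_TERMS = {
--     "missense_variant",
--     "synonymous_variant",
--     "stop_gained",
--     "stop_lost",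
--     "start_lost",
--     "frameshift_variant",
--     "inframe_insertion",
--     "inframe_deletion",
--     "protein_altering_variant",
-- }
--
-- SPLICE_CONSEQUENCE_TERMS = {
--     "splice_acceptor_variant",
--     "splice_donor_variant",
--     "splice_region_variant",
-- }
--
-- INTRONIC_CONSEQUENCE_TERMS = {
--     "intron_variant",
-- }
--
-- INTERGENIC_CONSEQUENCE_TERMS = {
--     "intergenic_variant",
-- }
--
-- REGULATORY_CONSEQUENCE_TERMS = {
--     "regulatory_region_variant",
--     "TF_binding_site_variant",
--     "mature_miRNA_variant",
--     "upstream_gene_variant",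
--     "downstream_gene_variant",
-- }
--
-- NONCODING_TRANSCRIPT_CONSEQUENCE_TERMS = {
--     "non_coding_transcript_exon_variant",
--     "non_coding_transcript_variant",
--     "NMD_transcript_variant",
-- }
--
-- def _is_missing(value: Any) -> bool:
--     if value is None:
--         return True
--     return str(value).strip() in MISSING_TOKENS
--
-- def _split_consequence_terms(consequence: str) -> set[str]:
--     if _is_missing(consequence):
--         return set()
--     normalized = consequence.replace(",", "&")
--     return {term.strip() for term in normalized.split("&") if term.strip()}
--
-- def _assign_variant_context(consequence: str) -> str:
--     terms = _split_consequence_terms(consequence)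
--     contexts = _assign_partition_contexts(consequence)
--     for context in CONTEXT_PRIORITY:
--         if context in contexts:
--             return context
--     if not terms:
--         return "unknown"
--     return "unknown"
--
-- def _assign_partition_contexts(consequence: str) -> set[str]:
--     terms = _split_consequence_terms(consequence)
--     contexts: set[str] = set()
--
--     if terms & CODING_CONSEQUENCE_TERMS:
--         contexts.add("coding")
--     if terms & SPLICE_CONSEQUENCE_TERMS:
--         contexts.add("splice_region")
--     if terms & INTRONIC_CONSEQUENCE_TERMS:
--         contexts.add("intronic")
--     if terms & INTERGENIC_CONSEQUENCE_TERMS: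
--         contexts.add("intergenic")
--     if terms & REGULATORY_CONSEQUENCE_TERMS:
--         contexts.add("regulatory")
--     if terms & NONCODING_TRANSCRIPT_CONSEQUENCE_TERMS:
--         contexts.add("noncoding_transcript")
--
--     if not contexts:
--         contexts.add("unknown")
--
--     return contexts
-- ===== SOURCE B (Python) =====
-- from typing import Any
--
-- MISSING_TOKENS = {"", "NA", "N/A", ".", "NULL", "None", "none", "nan", "NaN"}
--
-- CONTEXT_PRIORITY = [
--     "splice_region",
--     "coding",
--     "regulatory",
--     "intronic",
--     "intergenic",
--     "noncoding_transcript",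
--     "unknown",
-- ]
--
-- # one flat table: consequence term -> index of its context in CONTEXT_PRIORITY
-- _TERM_PRIORITY = {
--     "splice_acceptor_variant": 0,
--     "splice_donor_variant": 0,
--     "splice_region_variant": 0,
--     "missense_variant": 1,
--     "synonymous_variant": 1,
--     "stop_gained": 1,
--     "stop_lost": 1,
--     "start_lost": 1,
--     "frameshift_variant": 1,
--     "inframe_insertion": 1,
--     "inframe_deletion": 1,
--     "protein_altering_variant": 1,
--     "regulatory_region_variant": 2,
--     "TF_binding_site_variant": 2,
--     "mature_miRNA_variant": 2,
--     "upstream_gene_variant": 2,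
--     "downstream_gene_variant": 2,
--     "intron_variant": 3,
--     "intergenic_variant": 4,
--     "non_coding_transcript_exon_variant": 5,
--     "non_coding_transcript_variant": 5,
--     "NMD_transcript_variant": 5,
-- }
--
-- def _is_missing(value: Any) -> bool:
--     if value is None:
--         return True
--     return str(value).strip() in MISSING_TOKENS
--
-- def _split_consequence_terms(consequence: str) -> set[str]:
--     if _is_missing(consequence):
--         return set()
--     normalized = consequence.replace(",", "&")
--     return {term.strip() for term in normalized.split("&") if term.strip()}
--
-- def _assign_variant_context(consequence: str) -> str:
--     best = None
--     for term in _split_consequence_terms(consequence):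
--         idx = _TERM_PRIORITY.get(term)
--         if idx is not None and (best is None or idx < best):
--             best = idx
--     return "unknown" if best is None else CONTEXT_PRIORITY[best]
-- ===== Notes on version B (the rewrite author's own statement) =====
-- stated objective: simpler
-- what changed: Replaces the six set-intersection branches building an intermediate context set plus a priority-list scan by a single flat term->priority-index table and one running-minimum pass over the terms, returning CONTEXT_PRIORITY[min] or 'unknown'.
import Mathlib
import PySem

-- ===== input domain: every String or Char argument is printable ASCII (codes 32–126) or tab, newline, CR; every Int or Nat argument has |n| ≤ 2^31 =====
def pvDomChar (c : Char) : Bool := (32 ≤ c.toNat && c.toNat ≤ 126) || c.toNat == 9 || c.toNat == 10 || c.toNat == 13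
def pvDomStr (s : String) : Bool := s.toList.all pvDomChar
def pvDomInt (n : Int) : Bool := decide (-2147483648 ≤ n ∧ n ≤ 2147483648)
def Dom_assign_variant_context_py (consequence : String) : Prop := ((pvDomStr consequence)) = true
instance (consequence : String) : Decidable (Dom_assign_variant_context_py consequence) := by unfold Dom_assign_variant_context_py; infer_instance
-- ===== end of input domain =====

-- B replaces the six set-intersection branches plus priority scan by one flat
-- term->priority-index table and a single running-minimum pass (objective: simpler).


-- ===== PORT A =====
def pvMissingTokens : PySem.Set String :=
  PySem.Set.ofList ["", "NA", "N/A", ".", "NULL", "None", "none", "nan", "NaN"]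

def pvContextPriority : List String :=
  ["splice_region", "coding", "regulatory", "intronic", "intergenic", "noncoding_transcript", "unknown"]

def pvCodingTerms : PySem.Set String :=
  PySem.Set.ofList ["missense_variant", "synonymous_variant", "stop_gained", "stop_lost", "start_lost",
    "frameshift_variant", "inframe_insertion", "inframe_deletion", "protein_altering_variant"]

def pvSpliceTerms : PySem.Set String :=
  PySem.Set.ofList ["splice_acceptor_variant", "splice_donor_variant", "splice_region_variant"]

def pvIntronicTerms : PySem.Set String := PySem.Set.ofList ["intron_variant"]

def pvIntergenicTerms : PySem.Set String := PySem.Set.ofList ["intergenic_variant"]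

def pvRegulatoryTerms : PySem.Set String :=
  PySem.Set.ofList ["regulatory_region_variant", "TF_binding_site_variant", "mature_miRNA_variant",
    "upstream_gene_variant", "downstream_gene_variant"]

def pvNoncodingTerms : PySem.Set String :=
  PySem.Set.ofList ["non_coding_transcript_exon_variant", "non_coding_transcript_variant", "NMD_transcript_variant"]

-- _is_missing: the argument is always a str here, so the 'value is None' branch never fires
def pvIsMissing (value : String) : Bool :=
  PySem.Set.contains pvMissingTokens (PySem.Str.strip value)

def pvSplitConsequenceTerms (consequence : String) : PySem.Set String :=
  if pvIsMissing consequence then ([] : PySem.Set String)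
  else
    PySem.Set.ofList
      -- split on "&": the separator is nonempty, so split? is always `some`
      ((((PySem.Str.split? (PySem.Str.replace consequence "," "&") "&").getD []).map PySem.Str.strip).filter
        (fun t => t ≠ ""))

def pvAssignPartitionContexts (consequence : String) : PySem.Set String :=
  let terms := pvSplitConsequenceTerms consequence
  let contexts : PySem.Set String := []
  let contexts := if PySem.Set.inter terms pvCodingTerms ≠ [] then PySem.Set.add contexts "coding" else contexts
  let contexts := if PySem.Set.inter terms pvSpliceTerms ≠ [] then PySem.Set.add contexts "splice_region" else contexts
  let contexts := if PySem.Set.inter terms pvIntronicTerms ≠ [] then PySem.Set.add contexts "intronic" else contexts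
  let contexts := if PySem.Set.inter terms pvIntergenicTerms ≠ [] then PySem.Set.add contexts "intergenic" else contexts
  let contexts := if PySem.Set.inter terms pvRegulatoryTerms ≠ [] then PySem.Set.add contexts "regulatory" else contexts
  let contexts := if PySem.Set.inter terms pvNoncodingTerms ≠ [] then PySem.Set.add contexts "noncoding_transcript" else contexts
  let contexts := if contexts = [] then PySem.Set.add contexts "unknown" else contexts
  contexts

def assign_variant_context_py (consequence : String) : String :=
  let terms := pvSplitConsequenceTerms consequence
  let contexts := pvAssignPartitionContexts consequence
  match pvContextPriority.find? (fun c => PySem.Set.contains contexts c) with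
  | some c => c
  | none => if terms = [] then "unknown" else "unknown"

-- ===== PORT B =====
def pvMissingTokensB : PySem.Set String :=
  PySem.Set.ofList ["", "NA", "N/A", ".", "NULL", "None", "none", "nan", "NaN"]

def pvContextPriorityB : List String :=
  ["splice_region", "coding", "regulatory", "intronic", "intergenic", "noncoding_transcript", "unknown"]

-- dict literal with pairwise-distinct keys, so Dict.mk of the pair list is exact
def pvTermPriority : PySem.Dict String Int :=
  PySem.Dict.mk
    [("splice_acceptor_variant", 0), ("splice_donor_variant", 0), ("splice_region_variant", 0),
     ("missense_variant", 1), ("synonymous_variant", 1), ("stop_gained", 1), ("stop_lost", 1),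
     ("start_lost", 1), ("frameshift_variant", 1), ("inframe_insertion", 1), ("inframe_deletion", 1),
     ("protein_altering_variant", 1),
     ("regulatory_region_variant", 2), ("TF_binding_site_variant", 2), ("mature_miRNA_variant", 2),
     ("upstream_gene_variant", 2), ("downstream_gene_variant", 2),
     ("intron_variant", 3),
     ("intergenic_variant", 4),
     ("non_coding_transcript_exon_variant", 5), ("non_coding_transcript_variant", 5),
     ("NMD_transcript_variant", 5)]

def pvIsMissingB (value : String) : Bool :=
  PySem.Set.contains pvMissingTokensB (PySem.Str.strip value)

def pvSplitConsequenceTermsB (consequence : String) : PySem.Set String :=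
  if pvIsMissingB consequence then ([] : PySem.Set String)
  else
    PySem.Set.ofList
      -- split on "&": the separator is nonempty, so split? is always `some`
      ((((PySem.Str.split? (PySem.Str.replace consequence "," "&") "&").getD []).map PySem.Str.strip).filter
        (fun t => t ≠ ""))

def assign_variant_context_py_alt (consequence : String) : String :=
  let best :=
    (pvSplitConsequenceTermsB consequence).foldl
      (fun best term =>
        match PySem.Dict.get? pvTermPriority term with
        | none => best
        | some idx =>
          match best with
          | none => some idx
          | some b => if idx < b then some idx else some b)
      (none : Option Int)
  match best with
  | none => "unknown"
  | some b =>
    -- CONTEXT_PRIORITY[best]; b is always a table value 0..5, a valid index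
    match PySem.List.pyGet? pvContextPriorityB b with
    | some s => s
    | none => "unknown"

-- ===== PRECONDITION & SPEC =====
def Spec_assign_variant_context_py (consequence : String) (out : String) : Prop := out = assign_variant_context_py_alt consequence
instance (consequence : String) (out : String) : Decidable (Spec_assign_variant_context_py consequence out) := by unfold Spec_assign_variant_context_py; infer_instance

-- ===== CLAIM (what is proved, stated in full; the proofs are below) =====
def Claim_equal_assign_variant_context_py : Prop := ∀ (consequence : String), Dom_assign_variant_context_py consequence → Spec_assign_variant_context_py consequence (assign_variant_context_py consequence)

-- ===== LEMMAS AND PROOFS =====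

-- term -> priority index, as B's dict lookup
def pvP (t : String) : Option Int := PySem.Dict.get? pvTermPriority t

-- "some term of T has priority index i"
def pvB (i : Int) (T : List String) : Bool := T.any (fun t => pvP t == some i)

-- minimum priority index of T's terms
def pvM : Option Int → Option Int → Option Int
  | x, none => x
  | none, some j => some j
  | some i, some j => some (min i j)

def pvMinOpt (T : List String) : Option Int :=
  T.foldr (fun t r => pvM (pvP t) r) none

def pvScan (T : List String) : String :=
  if pvB 0 T then "splice_region"
  else if pvB 1 T then "coding"
  else if pvB 2 T then "regulatory"
  else if pvB 3 T then "intronic"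
  else if pvB 4 T then "intergenic"
  else if pvB 5 T then "noncoding_transcript"
  else "unknown"

def pvR (o : Option Int) : String :=
  match o with
  | none => "unknown"
  | some b =>
    match PySem.List.pyGet? pvContextPriorityB b with
    | some s => s
    | none => "unknown"

theorem get?_mk_eq_some_iff (l : List (String × Int)) (hnd : (l.map Prod.fst).Nodup)
    (t : String) (v : Int) : (PySem.Dict.mk l).get? t = some v ↔ (t, v) ∈ l := by
  induction l with
  | nil => simp [PySem.Dict.get?]
  | cons p l ih =>
    obtain ⟨k, w⟩ := p
    simp only [List.map_cons, List.nodup_cons] at hnd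
    rw [PySem.Dict.get?_mk_cons]
    by_cases h : k = t
    · subst h
      simp only [BEq.rfl, if_true, List.mem_cons, Option.some.injEq, Prod.mk.injEq, true_and]
      constructor
      · intro hv; exact Or.inl hv.symm
      · rintro (rfl | hmem)
        · rfl
        · have h' : ∀ x : Int, (k, x) ∉ l := by simpa using hnd.1
          exact absurd hmem (h' v)
    · rw [if_neg (by simpa using h)]
      rw [ih hnd.2]
      simp only [List.mem_cons, Prod.mk.injEq]
      constructor
      · exact Or.inr
      · rintro (⟨rfl, rfl⟩ | hmem)
        · exact absurd rfl h
        · exact hmem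

theorem pvP_eq_iff (t : String) (v : Int) : pvP t = some v ↔ (t, v) ∈ pvTermPriority.items := by
  rw [pvP, pvTermPriority]
  exact get?_mk_eq_some_iff _ (by decide) t v

theorem pvP_range (t : String) (i : Int) (h : pvP t = some i) : 0 ≤ i ∧ i < 6 := by
  rw [pvP_eq_iff] at h
  simp only [pvTermPriority, List.mem_cons, Prod.mk.injEq, List.not_mem_nil, or_false] at h
  rcases h with h|h|h|h|h|h|h|h|h|h|h|h|h|h|h|h|h|h|h|h|h|h <;> omega

theorem contains_coding (t : String) :
    (PySem.Set.contains pvCodingTerms t = true) ↔ pvP t = some 1 := by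
  have hC : pvCodingTerms = ["missense_variant", "synonymous_variant", "stop_gained", "stop_lost",
      "start_lost", "frameshift_variant", "inframe_insertion", "inframe_deletion",
      "protein_altering_variant"] := by decide
  rw [hC, PySem.Set.contains_iff, pvP_eq_iff]
  simp only [pvTermPriority, List.mem_cons, Prod.mk.injEq, List.not_mem_nil, or_false]
  norm_num

theorem contains_splice (t : String) :
    (PySem.Set.contains pvSpliceTerms t = true) ↔ pvP t = some 0 := by
  have hC : pvSpliceTerms = ["splice_acceptor_variant", "splice_donor_variant",
      "splice_region_variant"] := by decide
  rw [hC, PySem.Set.contains_iff, pvP_eq_iff]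
  simp only [pvTermPriority, List.mem_cons, Prod.mk.injEq, List.not_mem_nil, or_false]
  norm_num

theorem contains_intronic (t : String) :
    (PySem.Set.contains pvIntronicTerms t = true) ↔ pvP t = some 3 := by
  have hC : pvIntronicTerms = ["intron_variant"] := by decide
  rw [hC, PySem.Set.contains_iff, pvP_eq_iff]
  simp only [pvTermPriority, List.mem_cons, Prod.mk.injEq, List.not_mem_nil, or_false]
  norm_num

theorem contains_intergenic (t : String) :
    (PySem.Set.contains pvIntergenicTerms t = true) ↔ pvP t = some 4 := by
  have hC : pvIntergenicTerms = ["intergenic_variant"] := by decide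
  rw [hC, PySem.Set.contains_iff, pvP_eq_iff]
  simp only [pvTermPriority, List.mem_cons, Prod.mk.injEq, List.not_mem_nil, or_false]
  norm_num

theorem contains_regulatory (t : String) :
    (PySem.Set.contains pvRegulatoryTerms t = true) ↔ pvP t = some 2 := by
  have hC : pvRegulatoryTerms = ["regulatory_region_variant", "TF_binding_site_variant",
      "mature_miRNA_variant", "upstream_gene_variant", "downstream_gene_variant"] := by decide
  rw [hC, PySem.Set.contains_iff, pvP_eq_iff]
  simp only [pvTermPriority, List.mem_cons, Prod.mk.injEq, List.not_mem_nil, or_false]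
  norm_num

theorem contains_noncoding (t : String) :
    (PySem.Set.contains pvNoncodingTerms t = true) ↔ pvP t = some 5 := by
  have hC : pvNoncodingTerms = ["non_coding_transcript_exon_variant",
      "non_coding_transcript_variant", "NMD_transcript_variant"] := by decide
  rw [hC, PySem.Set.contains_iff, pvP_eq_iff]
  simp only [pvTermPriority, List.mem_cons, Prod.mk.injEq, List.not_mem_nil, or_false]
  norm_num

theorem inter_ne_nil_iff (T S : PySem.Set String) (i : Int)
    (hS : ∀ t, (PySem.Set.contains S t = true) ↔ pvP t = some i) :
    (PySem.Set.inter T S ≠ []) ↔ pvB i T = true := by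
  rw [pvB, List.any_eq_true]
  constructor
  · intro h
    obtain ⟨y, hy⟩ := List.exists_mem_of_ne_nil _ h
    rw [PySem.Set.mem_inter] at hy
    exact ⟨y, hy.1, by simpa using (hS y).mp ((PySem.Set.contains_iff _ _).mpr hy.2)⟩
  · rintro ⟨y, hyT, hy⟩
    intro hnil
    have : y ∈ PySem.Set.inter T S := by
      rw [PySem.Set.mem_inter]
      exact ⟨hyT, (PySem.Set.contains_iff _ _).mp ((hS y).mpr (by simpa using hy))⟩
    simp [hnil] at this

theorem A_eq_scan (s : String) :
    assign_variant_context_py s = pvScan (pvSplitConsequenceTerms s) := by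
  have h0 := inter_ne_nil_iff (pvSplitConsequenceTerms s) pvSpliceTerms 0 contains_splice
  have h1 := inter_ne_nil_iff (pvSplitConsequenceTerms s) pvCodingTerms 1 contains_coding
  have h2 := inter_ne_nil_iff (pvSplitConsequenceTerms s) pvRegulatoryTerms 2 contains_regulatory
  have h3 := inter_ne_nil_iff (pvSplitConsequenceTerms s) pvIntronicTerms 3 contains_intronic
  have h4 := inter_ne_nil_iff (pvSplitConsequenceTerms s) pvIntergenicTerms 4 contains_intergenic
  have h5 := inter_ne_nil_iff (pvSplitConsequenceTerms s) pvNoncodingTerms 5 contains_noncoding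
  by_cases b0 : pvB 0 (pvSplitConsequenceTerms s) = true <;>
  by_cases b1 : pvB 1 (pvSplitConsequenceTerms s) = true <;>
  by_cases b2 : pvB 2 (pvSplitConsequenceTerms s) = true <;>
  by_cases b3 : pvB 3 (pvSplitConsequenceTerms s) = true <;>
  by_cases b4 : pvB 4 (pvSplitConsequenceTerms s) = true <;>
  by_cases b5 : pvB 5 (pvSplitConsequenceTerms s) = true <;>
  simp_all [assign_variant_context_py, pvAssignPartitionContexts, pvScan, PySem.Set.add,
    List.find?, pvContextPriority]

theorem step_eq_pvM (acc : Option Int) (t : String) :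
    (match PySem.Dict.get? pvTermPriority t with
      | none => acc
      | some idx =>
        match acc with
        | none => some idx
        | some b => if idx < b then some idx else some b) = pvM acc (pvP t) := by
  rw [pvP]
  cases h : PySem.Dict.get? pvTermPriority t with
  | none => cases acc <;> simp [pvM]
  | some idx =>
    cases acc with
    | none => simp [pvM]
    | some b =>
      simp only [pvM]
      split_ifs with hlt
      · simp [le_of_lt hlt]
      · simp [not_lt.mp hlt]

theorem pvM_assoc (a b c : Option Int) : pvM (pvM a b) c = pvM a (pvM b c) := by
  cases a <;> cases b <;> cases c <;> simp [pvM, min_assoc]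

theorem foldl_step_eq (T : List String) (acc : Option Int) :
    T.foldl
      (fun best term =>
        match PySem.Dict.get? pvTermPriority term with
        | none => best
        | some idx =>
          match best with
          | none => some idx
          | some b => if idx < b then some idx else some b)
      acc = pvM acc (pvMinOpt T) := by
  induction T generalizing acc with
  | nil => cases acc <;> simp [pvMinOpt, pvM]
  | cons t T ih =>
    simp only [List.foldl_cons]
    rw [ih, step_eq_pvM, pvM_assoc]
    rfl

theorem minOpt_cons (t : String) (T : List String) :
    pvMinOpt (t :: T) = pvM (pvP t) (pvMinOpt T) := rfl

theorem minOpt_achieved (T : List String) (v : Int) (h : pvMinOpt T = some v) :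
    pvB v T = true := by
  induction T with
  | nil => simp [pvMinOpt] at h
  | cons t T ih =>
    rw [minOpt_cons] at h
    simp only [pvB, List.any_cons]
    cases hp : pvP t with
    | none =>
      rw [hp] at h
      cases hm : pvMinOpt T with
      | none => rw [hm] at h; simp [pvM] at h
      | some w =>
        rw [hm] at h
        simp only [pvM, Option.some.injEq] at h
        subst h
        have hB := ih hm
        simp only [pvB] at hB
        simp [hB]
    | some i =>
      rw [hp] at h
      cases hm : pvMinOpt T with
      | none =>
        rw [hm] at h
        simp only [pvM, Option.some.injEq] at h
        subst h
        simp
      | some w =>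
        rw [hm] at h
        simp only [pvM, Option.some.injEq] at h
        rcases le_total i w with hle | hle
        · have hv : v = i := by omega
          simp [hv]
        · have hv : v = w := by omega
          subst hv
          have hB := ih hm
          simp only [pvB] at hB
          simp [hB]

theorem b_min_le (T : List String) (i : Int) (h : pvB i T = true) :
    ∃ v, pvMinOpt T = some v ∧ v ≤ i := by
  induction T with
  | nil => simp [pvB] at h
  | cons t T ih =>
    simp only [pvB, List.any_cons, Bool.or_eq_true, beq_iff_eq] at h
    rw [minOpt_cons]
    rcases h with h | h
    · rw [h]
      cases hm : pvMinOpt T with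
      | none => exact ⟨i, rfl, le_refl i⟩
      | some w => exact ⟨min i w, rfl, min_le_left i w⟩
    · obtain ⟨v, hv, hvi⟩ := ih h
      rw [hv]
      cases hp : pvP t with
      | none => exact ⟨v, rfl, hvi⟩
      | some j => exact ⟨min j v, rfl, le_trans (min_le_right j v) hvi⟩

theorem scan_eq_min (T : List String) : pvScan T = pvR (pvMinOpt T) := by
  cases h : pvMinOpt T with
  | none =>
    have hb : ∀ i : Int, pvB i T = false := by
      intro i
      by_contra hc
      obtain ⟨v, hv, _⟩ := b_min_le T i (by simpa using hc)
      rw [h] at hv; cases hv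
    simp [pvScan, pvR, hb]
  | some v =>
    have hach := minOpt_achieved T v h
    obtain ⟨t, ht, hp⟩ : ∃ t ∈ T, (pvP t == some v) = true := by
      rw [pvB, List.any_eq_true] at hach
      exact hach
    have hrange := pvP_range t v (by simpa using hp)
    obtain ⟨hr1, hr2⟩ := hrange
    have hlow : ∀ j : Int, j < v → pvB j T = false := by
      intro j hj
      by_contra hc
      obtain ⟨w, hw, hwj⟩ := b_min_le T j (by simpa using hc)
      rw [h] at hw
      injection hw with hw
      omega
    interval_cases v
    · simp [pvScan, pvR, hach, pvContextPriorityB, PySem.List.pyGet?, PySem.List.pyIdx?]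
    · simp [pvScan, pvR, hach, pvContextPriorityB, PySem.List.pyGet?, PySem.List.pyIdx?, hlow 0 (by norm_num)]
    · simp [pvScan, pvR, hach, pvContextPriorityB, PySem.List.pyGet?, PySem.List.pyIdx?, hlow 0 (by norm_num), hlow 1 (by norm_num)]
    · simp [pvScan, pvR, hach, pvContextPriorityB, PySem.List.pyGet?, PySem.List.pyIdx?, hlow 0 (by norm_num), hlow 1 (by norm_num), hlow 2 (by norm_num)]
    · simp [pvScan, pvR, hach, pvContextPriorityB, PySem.List.pyGet?, PySem.List.pyIdx?, hlow 0 (by norm_num), hlow 1 (by norm_num), hlow 2 (by norm_num),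
        hlow 3 (by norm_num)]
    · simp [pvScan, pvR, hach, pvContextPriorityB, PySem.List.pyGet?, PySem.List.pyIdx?, hlow 0 (by norm_num), hlow 1 (by norm_num), hlow 2 (by norm_num),
        hlow 3 (by norm_num), hlow 4 (by norm_num)]

theorem split_terms_same : pvSplitConsequenceTermsB = pvSplitConsequenceTerms := rfl

theorem B_eq_min (s : String) :
    assign_variant_context_py_alt s = pvR (pvMinOpt (pvSplitConsequenceTerms s)) := by
  simp only [assign_variant_context_py_alt, split_terms_same, foldl_step_eq]
  cases pvMinOpt (pvSplitConsequenceTerms s) <;> simp [pvM, pvR]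

-- ===== VERDICT (by name: the statement is the Claim_ definition above) =====
theorem assign_variant_context_py_spec : Claim_equal_assign_variant_context_py := by
  intro s _
  unfold Spec_assign_variant_context_py
  rw [A_eq_scan, B_eq_min, scan_eq_min]
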